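-- pv_equiv track=rewrite | github.com/duckies1/Word-Segmentation-System | CCA.py | make_ellipse_offsets
-- ===== SOURCE A (Python) =====
-- def make_ellipse_offsets(a, b):
--     """Return list of (dy, dx) integer offsets inside an ellipse of radii a (x) and b (y)."""
--     offsets = []
--     aa = float(max(1, a * a))
--     bb = float(max(1, b * b))
--     for dy in range(-b, b + 1):
--         for dx in range(-a, a + 1):
--             if (dx * dx) / aa + (dy * dy) / bb <= 1.0:
--                 offsets.append((dy, dx))
--     return offsets
-- ===== SOURCE B (Python) =====
-- def make_ellipse_offsets(a, b):
--     """Return list of (dy, dx) integer offsets inside an ellipse of radii a (x) and b (y).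
--
--     Row-interval version: for each row dy, scan the half-width m upward with the
--     same float test (the test is monotone in dx*dx, so the row is the contiguous
--     interval -m..m), then emit the whole interval without testing each cell."""
--     aa = float(max(1, a * a))
--     bb = float(max(1, b * b))
--     offsets = []
--     for dy in range(-b, b + 1):
--         t = (dy * dy) / bb
--         m = -1
--         while m < a and ((m + 1) * (m + 1)) / aa + t <= 1.0:
--             m += 1
--         for dx in range(-m, m + 1):
--             offsets.append((dy, dx))
--     return offsets
-- ===== Notes on version B (the rewrite author's own statement) =====
-- stated objective: alternative
-- what changed: B computes each row's half-width m once by scanning the monotone float test upward and emits the contiguous interval -m..m, instead of testing all 2a+1 cells of every row (measured ~1.5x at n=256 but unconfirmed at the largest size).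
import Mathlib
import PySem

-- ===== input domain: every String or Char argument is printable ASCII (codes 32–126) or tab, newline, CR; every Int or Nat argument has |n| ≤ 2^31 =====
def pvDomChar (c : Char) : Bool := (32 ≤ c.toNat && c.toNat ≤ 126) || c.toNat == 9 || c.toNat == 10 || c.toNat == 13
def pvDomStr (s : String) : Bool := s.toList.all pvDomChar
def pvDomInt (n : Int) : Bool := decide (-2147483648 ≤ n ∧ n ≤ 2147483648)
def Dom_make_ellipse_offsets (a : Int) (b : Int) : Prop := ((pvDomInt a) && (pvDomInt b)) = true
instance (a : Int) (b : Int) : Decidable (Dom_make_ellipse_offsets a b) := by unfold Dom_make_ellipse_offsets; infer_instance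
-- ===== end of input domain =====

-- B scans each row's half-width m once with the same (monotone) float boundary test and emits the
-- contiguous dx interval -m..m, instead of testing every cell of the bounding box.
--
-- Shared float model (used by BOTH ports, replacing Python's IEEE-754 doubles): every double
-- arising here (float(max(1,a*a)), float(dx*dx), their quotients, a sum of two quotients — all
-- in [0, 2^62], normal, no overflow/underflow) is obtained by rounding the exact rational result
-- of the operation to 53 significant bits, ties to even.  pvRound is exactly that rounding on
-- nonnegative rationals; int→float conversion, /, and + each round once, as in IEEE-754.

-- round N/D (used with N ≥ 0, D > 0) to the nearest integer, ties to even
def pvRndivNE (N D : Int) : Int :=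
  if 2 * (N % D) < D then N / D
  else if D < 2 * (N % D) then N / D + 1
  else if (N / D) % 2 = 0 then N / D else N / D + 1

-- is n/d ≥ 2^e (n, d ≥ 1)?
def pvScaleGE (n d : Nat) (e : Int) : Bool :=
  if 0 ≤ e then d * 2 ^ e.toNat ≤ n else d ≤ n * 2 ^ (-e).toNat

-- ⌊log2 (n/d)⌋ for n, d ≥ 1
def pvExp (n d : Nat) : Int :=
  if pvScaleGE n d ((Nat.log2 n : Int) - (Nat.log2 d : Int))
  then (Nat.log2 n : Int) - (Nat.log2 d : Int)
  else (Nat.log2 n : Int) - (Nat.log2 d : Int) - 1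

-- round (n/d) / 2^s to the nearest integer, ties to even
def pvMant (n d : Nat) (s : Int) : Int :=
  if 0 ≤ s then pvRndivNE (n : Int) ((d : Int) * 2 ^ s.toNat)
  else pvRndivNE ((n : Int) * 2 ^ (-s).toNat) (d : Int)

-- round a nonnegative rational to the nearest 53-bit-mantissa value, ties to even
def pvRound (q : ℚ) : ℚ :=
  if q ≤ 0 then 0 else
    if 0 ≤ pvExp q.num.toNat q.den - 52 then
      (pvMant q.num.toNat q.den (pvExp q.num.toNat q.den - 52) : ℚ) *
        ((2 : ℚ) ^ (pvExp q.num.toNat q.den - 52).toNat)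
    else
      (pvMant q.num.toNat q.den (pvExp q.num.toNat q.den - 52) : ℚ) /
        ((2 : ℚ) ^ (-(pvExp q.num.toNat q.den - 52)).toNat)

-- ===== PORT A =====
-- the Python test '(dx*dx)/aa + (dy*dy)/bb <= 1.0' (aa, bb already doubles): each int operand
-- is converted to a double, each / and + rounds its exact result; the comparison is exact
def pvLe1 (aa bb : ℚ) (dy dx : Int) : Bool :=
  decide (pvRound (pvRound (pvRound ((dx * dx : Int) : ℚ) / aa)
                 + pvRound (pvRound ((dy * dy : Int) : ℚ) / bb)) ≤ 1)

def make_ellipse_offsets (a : Int) (b : Int) : List (Int × Int) :=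
  let aa := pvRound ((max 1 (a * a) : Int) : ℚ)
  let bb := pvRound ((max 1 (b * b) : Int) : ℚ)
  (PySem.List.pyRange (-b) (b + 1) 1).foldl (fun offsets dy =>
    (PySem.List.pyRange (-a) (a + 1) 1).foldl (fun offsets dx =>
      if pvLe1 aa bb dy dx then offsets ++ [(dy, dx)] else offsets) offsets) []

-- ===== PORT B =====
-- Source B's while-condition '((m+1)*(m+1))/aa + t <= 1.0' with the row constant t precomputed
def pvTest (aa t : ℚ) (x : Int) : Bool :=
  decide (pvRound (pvRound (pvRound ((x * x : Int) : ℚ) / aa) + t) ≤ 1)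

-- Source B's 'while m < a and ((m+1)*(m+1))/aa + t <= 1.0: m += 1'
def pvWhile (aa t : ℚ) (a m : Int) : Int :=
  if h : m < a ∧ pvTest aa t (m + 1) = true then pvWhile aa t a (m + 1) else m
termination_by (a - m).toNat
decreasing_by omega

-- Source B's inner 'for dx in range(-m, m+1): offsets.append((dy, dx))'
def pvEmit (dy : Int) : List Int → List (Int × Int)
  | [] => []
  | dx :: rest => (dy, dx) :: pvEmit dy rest

-- Source B's outer loop over the rows, as structural recursion on the list of dy values
def pvRows (aa bb : ℚ) (a : Int) : List Int → List (Int × Int)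
  | [] => []
  | dy :: rest =>
    pvEmit dy (PySem.List.pyRange
      (-(pvWhile aa (pvRound (pvRound ((dy * dy : Int) : ℚ) / bb)) a (-1)))
      ((pvWhile aa (pvRound (pvRound ((dy * dy : Int) : ℚ) / bb)) a (-1)) + 1) 1)
      ++ pvRows aa bb a rest

def make_ellipse_offsets_alt (a : Int) (b : Int) : List (Int × Int) :=
  let aa := pvRound ((max 1 (a * a) : Int) : ℚ)
  let bb := pvRound ((max 1 (b * b) : Int) : ℚ)
  pvRows aa bb a (PySem.List.pyRange (-b) (b + 1) 1)

-- ===== PRECONDITION & SPEC =====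
def Spec_make_ellipse_offsets (a : Int) (b : Int) (out : List (Int × Int)) : Prop := out = make_ellipse_offsets_alt a b
instance (a : Int) (b : Int) (out : List (Int × Int)) : Decidable (Spec_make_ellipse_offsets a b out) := by unfold Spec_make_ellipse_offsets; infer_instance

-- ===== CLAIM (what is proved, stated in full; the proofs are below) =====
def Claim_equal_make_ellipse_offsets : Prop := ∀ (a : Int) (b : Int), Dom_make_ellipse_offsets a b → Spec_make_ellipse_offsets a b (make_ellipse_offsets a b)

-- ===== LEMMAS AND PROOFS =====

-- ---- the rounding-to-nearest primitive ----

lemma pvRndivNE_cases (N D : Int) : pvRndivNE N D = N / D ∨ pvRndivNE N D = N / D + 1 := by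
  unfold pvRndivNE; split_ifs <;> simp

lemma pvRndivNE_nonneg (N D : Int) (hN : 0 ≤ N) (hD : 0 < D) : 0 ≤ pvRndivNE N D := by
  have hq : 0 ≤ N / D := Int.ediv_nonneg hN hD.le
  rcases pvRndivNE_cases N D with h | h <;> omega

-- 2N - D ≤ 2·D·rnd ≤ 2N + D  (rnd is within half a unit of N/D)
lemma pvRndivNE_bounds (N D : Int) (hN : 0 ≤ N) (hD : 0 < D) :
    2 * N - D ≤ 2 * (D * pvRndivNE N D) ∧ 2 * (D * pvRndivNE N D) ≤ 2 * N + D := by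
  have h := Int.ediv_add_emod N D
  have hr0 : 0 ≤ N % D := Int.emod_nonneg N (ne_of_gt hD)
  have hrD : N % D < D := Int.emod_lt_of_pos N hD
  unfold pvRndivNE
  split_ifs with h1 h2 h3 <;> constructor <;> nlinarith

lemma pvRndivNE_up (N D : Int) (h : pvRndivNE N D = N / D + 1) :
    D ≤ 2 * (N % D) ∧ (2 * (N % D) = D → ¬ (N / D) % 2 = 0) := by
  unfold pvRndivNE at h
  split_ifs at h <;> omega

lemma pvRndivNE_down (N D : Int) (h : pvRndivNE N D = N / D) :
    2 * (N % D) ≤ D ∧ (2 * (N % D) = D → (N / D) % 2 = 0) := by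
  unfold pvRndivNE at h
  split_ifs at h <;> omega

lemma pvRndivNE_mono (N1 D1 N2 D2 : Int) (hN1 : 0 ≤ N1) (hD1 : 0 < D1)
    (hN2 : 0 ≤ N2) (hD2 : 0 < D2) (h : N1 * D2 ≤ N2 * D1) :
    pvRndivNE N1 D1 ≤ pvRndivNE N2 D2 := by
  have h1 := Int.ediv_add_emod N1 D1
  have h2 := Int.ediv_add_emod N2 D2
  have hr10 : 0 ≤ N1 % D1 := Int.emod_nonneg N1 (ne_of_gt hD1)
  have hr1D : N1 % D1 < D1 := Int.emod_lt_of_pos N1 hD1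
  have hr20 : 0 ≤ N2 % D2 := Int.emod_nonneg N2 (ne_of_gt hD2)
  have hr2D : N2 % D2 < D2 := Int.emod_lt_of_pos N2 hD2
  have e1' : N1 * D2 = D1 * (N1 / D1) * D2 + (N1 % D1) * D2 := by linear_combination D2 * h1.symm
  have e2' : N2 * D1 = D2 * (N2 / D2) * D1 + (N2 % D2) * D1 := by linear_combination D1 * h2.symm
  have hexp : D1 * (N1 / D1) * D2 + (N1 % D1) * D2 ≤ D2 * (N2 / D2) * D1 + (N2 % D2) * D1 := by
    linarith [h, e1', e2']
  have hq12 : N1 / D1 ≤ N2 / D2 := by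
    by_contra hc
    push_neg at hc
    have hstep : D1 * D2 * (N2 / D2 + 1) ≤ D1 * D2 * (N1 / D1) :=
      mul_le_mul_of_nonneg_left (by omega) (by positivity)
    have hb1 : D1 * (N2 % D2) < D1 * D2 := by
      exact mul_lt_mul_of_pos_left hr2D hD1
    have hb2 : 0 ≤ (N1 % D1) * D2 := mul_nonneg hr10 hD2.le
    nlinarith
  by_cases hq : N1 / D1 < N2 / D2
  · rcases pvRndivNE_cases N1 D1 with e1 | e1 <;> rcases pvRndivNE_cases N2 D2 with e2 | e2 <;> omega
  · have hq' : N1 / D1 = N2 / D2 := le_antisymm hq12 (by omega)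
    rw [hq'] at hexp
    have hr : (N1 % D1) * D2 ≤ (N2 % D2) * D1 := by nlinarith
    by_contra hcon
    push_neg at hcon
    have hc1 := pvRndivNE_cases N1 D1
    have hc2 := pvRndivNE_cases N2 D2
    have hv1 : pvRndivNE N1 D1 = N1 / D1 + 1 := by omega
    have hv2 : pvRndivNE N2 D2 = N2 / D2 := by omega
    obtain ⟨hup, hupt⟩ := pvRndivNE_up N1 D1 hv1
    obtain ⟨hdn, hdnt⟩ := pvRndivNE_down N2 D2 hv2
    have f1 : D1 * D2 ≤ 2 * (N1 % D1) * D2 := mul_le_mul_of_nonneg_right hup hD2.le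
    have f2 : 2 * (N2 % D2) * D1 ≤ D2 * D1 := mul_le_mul_of_nonneg_right hdn hD1.le
    -- the three inequalities squeeze everything into the double-tie case
    have g1 : 2 * (N1 % D1) * D2 = D1 * D2 := by nlinarith
    have g2 : 2 * (N2 % D2) * D1 = D2 * D1 := by nlinarith
    have t1 : 2 * (N1 % D1) = D1 := by
      have := mul_right_cancel₀ (ne_of_gt hD2) g1
      omega
    have t2 : 2 * (N2 % D2) = D2 := by
      have := mul_right_cancel₀ (ne_of_gt hD1) g2
      omega
    have := hupt t1
    have := hdnt t2
    omega

-- ---- the exponent computation ----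

lemma pvScaleGE_iff (n d : Nat) (hd : 1 ≤ d) (e : Int) :
    pvScaleGE n d e = true ↔ (2 : ℚ) ^ e ≤ (n : ℚ) / (d : ℚ) := by
  have hd0 : (0 : ℚ) < (d : ℚ) := by exact_mod_cast hd
  unfold pvScaleGE
  split_ifs with hs
  · rw [decide_eq_true_iff, ← Int.toNat_of_nonneg hs, zpow_natCast, le_div_iff₀ hd0]
    generalize e.toNat = k
    constructor
    · intro h'
      have h'' : ((d * 2 ^ k : Nat) : ℚ) ≤ (n : ℚ) := by exact_mod_cast h'
      push_cast at h''
      linarith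
    · intro h'
      have h'' : ((d * 2 ^ k : Nat) : ℚ) ≤ (n : ℚ) := by push_cast; linarith
      exact_mod_cast h''
  · rw [decide_eq_true_iff]
    have he : e = -(((-e).toNat : Nat) : Int) := by omega
    rw [he]
    simp only [neg_neg, Int.toNat_natCast]
    generalize (-e).toNat = k
    rw [zpow_neg, zpow_natCast, le_div_iff₀ hd0, inv_mul_le_iff₀ (by positivity)]
    constructor
    · intro h'
      calc (d : ℚ) ≤ ((n * 2 ^ k : Nat) : ℚ) := by exact_mod_cast h'
        _ = 2 ^ k * (n : ℚ) := by push_cast; ring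
    · intro h'
      have : (d : ℚ) ≤ ((n * 2 ^ k : Nat) : ℚ) := by push_cast; linarith
      exact_mod_cast this

lemma pvExp_bracket (n d : Nat) (hn : 1 ≤ n) (hd : 1 ≤ d) :
    (2 : ℚ) ^ (pvExp n d) ≤ (n : ℚ) / (d : ℚ) ∧ (n : ℚ) / (d : ℚ) < (2 : ℚ) ^ (pvExp n d + 1) := by
  have hd0 : (0 : ℚ) < (d : ℚ) := by exact_mod_cast hd
  have hn0 : (0 : ℚ) < (n : ℚ) := by exact_mod_cast hn
  have hLn : (2 : ℚ) ^ (Nat.log2 n) ≤ (n : ℚ) := by exact_mod_cast Nat.log2_self_le (by omega)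
  have hLn' : (n : ℚ) < (2 : ℚ) ^ (Nat.log2 n + 1) := by exact_mod_cast Nat.lt_log2_self
  have hLd : (2 : ℚ) ^ (Nat.log2 d) ≤ (d : ℚ) := by exact_mod_cast Nat.log2_self_le (by omega)
  have hLd' : (d : ℚ) < (2 : ℚ) ^ (Nat.log2 d + 1) := by exact_mod_cast Nat.lt_log2_self
  unfold pvExp
  split_ifs with hs
  · refine ⟨(pvScaleGE_iff n d hd _).1 hs, ?_⟩
    calc (n : ℚ) / d ≤ (n : ℚ) / (2 : ℚ) ^ (Nat.log2 d) :=
          div_le_div_of_nonneg_left hn0.le (by positivity) hLd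
      _ < (2 : ℚ) ^ (Nat.log2 n + 1) / (2 : ℚ) ^ (Nat.log2 d) :=
          div_lt_div_of_pos_right hLn' (by positivity)
      _ = (2 : ℚ) ^ ((Nat.log2 n : Int) - (Nat.log2 d : Int) + 1) := by
          rw [← zpow_natCast (2:ℚ) (Nat.log2 n + 1), ← zpow_natCast (2:ℚ) (Nat.log2 d),
            ← zpow_sub₀ (by norm_num : (2:ℚ) ≠ 0)]
          congr 1; push_cast; omega
  · have hs' : ¬ ((2 : ℚ) ^ ((Nat.log2 n : Int) - (Nat.log2 d : Int)) ≤ (n : ℚ) / (d : ℚ)) := by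
      intro hcon
      exact hs ((pvScaleGE_iff n d hd _).2 hcon)
    push_neg at hs'
    constructor
    · calc (2 : ℚ) ^ ((Nat.log2 n : Int) - (Nat.log2 d : Int) - 1)
          = (2 : ℚ) ^ (Nat.log2 n) / (2 : ℚ) ^ (Nat.log2 d + 1) := by
            rw [← zpow_natCast (2:ℚ) (Nat.log2 n), ← zpow_natCast (2:ℚ) (Nat.log2 d + 1),
              ← zpow_sub₀ (by norm_num : (2:ℚ) ≠ 0)]
            congr 1; push_cast; omega
        _ ≤ (n : ℚ) / (2 : ℚ) ^ (Nat.log2 d + 1) :=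
            div_le_div_of_nonneg_right hLn (by positivity)
        _ ≤ (n : ℚ) / d := div_le_div_of_nonneg_left hn0.le hd0 hLd'.le
    · have : (Nat.log2 n : Int) - (Nat.log2 d : Int) - 1 + 1
          = (Nat.log2 n : Int) - (Nat.log2 d : Int) := by omega
      rw [this]
      exact hs'

-- ---- the mantissa computation ----

lemma pvMant_ratio (n d : Nat) (hd : 1 ≤ d) (s : Int) :
    ∃ N D : Int, 0 ≤ N ∧ 0 < D ∧ pvMant n d s = pvRndivNE N D ∧
      (N : ℚ) / (D : ℚ) = (n : ℚ) / (d : ℚ) * (2 : ℚ) ^ (-s) := by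
  have hd0 : (0 : ℚ) < (d : ℚ) := by exact_mod_cast hd
  unfold pvMant
  split_ifs with hs
  · refine ⟨(n : Int), (d : Int) * 2 ^ s.toNat, by positivity, by positivity, rfl, ?_⟩
    generalize hk : s.toNat = k
    have h : (-s) = -((k : Nat) : Int) := by omega
    rw [h, zpow_neg, zpow_natCast]
    push_cast
    field_simp
  · refine ⟨(n : Int) * 2 ^ (-s).toNat, (d : Int), by positivity, by exact_mod_cast hd, rfl, ?_⟩
    generalize hk : (-s).toNat = k
    have h : (-s) = ((k : Nat) : Int) := by omega
    rw [h, zpow_natCast]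
    push_cast
    ring

lemma pvRndivNE_bounds_q (N D : Int) (hN : 0 ≤ N) (hD : 0 < D) :
    (N : ℚ) / (D : ℚ) - 1/2 ≤ (pvRndivNE N D : ℚ) ∧
      (pvRndivNE N D : ℚ) ≤ (N : ℚ) / (D : ℚ) + 1/2 := by
  obtain ⟨h1, h2⟩ := pvRndivNE_bounds N D hN hD
  have hD0 : (0 : ℚ) < (D : ℚ) := by exact_mod_cast hD
  have c1 : (2 * N - D : ℚ) ≤ 2 * ((D : ℚ) * (pvRndivNE N D : ℚ)) := by exact_mod_cast h1
  have c2 : 2 * ((D : ℚ) * (pvRndivNE N D : ℚ)) ≤ (2 * N + D : ℚ) := by exact_mod_cast h2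
  constructor
  · rw [sub_le_iff_le_add, div_le_iff₀ hD0]
    nlinarith
  · rw [← sub_le_iff_le_add, le_div_iff₀ hD0]
    nlinarith

lemma pvMant_bounds (n d : Nat) (hd : 1 ≤ d) (s : Int) :
    (n : ℚ) / (d : ℚ) * (2 : ℚ) ^ (-s) - 1/2 ≤ (pvMant n d s : ℚ) ∧
      (pvMant n d s : ℚ) ≤ (n : ℚ) / (d : ℚ) * (2 : ℚ) ^ (-s) + 1/2 := by
  obtain ⟨N, D, hN, hD, he, hr⟩ := pvMant_ratio n d hd s
  rw [he, ← hr]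
  exact pvRndivNE_bounds_q N D hN hD

lemma pvMant_nonneg (n d : Nat) (hd : 1 ≤ d) (s : Int) : 0 ≤ pvMant n d s := by
  obtain ⟨N, D, hN, hD, he, _⟩ := pvMant_ratio n d hd s
  rw [he]
  exact pvRndivNE_nonneg N D hN hD

lemma pvMant_mono (n1 d1 : Nat) (hd1 : 1 ≤ d1) (s1 : Int) (n2 d2 : Nat) (hd2 : 1 ≤ d2) (s2 : Int)
    (h : (n1 : ℚ) / (d1 : ℚ) * (2 : ℚ) ^ (-s1) ≤ (n2 : ℚ) / (d2 : ℚ) * (2 : ℚ) ^ (-s2)) :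
    pvMant n1 d1 s1 ≤ pvMant n2 d2 s2 := by
  obtain ⟨N1, D1, hN1, hD1, he1, hr1⟩ := pvMant_ratio n1 d1 hd1 s1
  obtain ⟨N2, D2, hN2, hD2, he2, hr2⟩ := pvMant_ratio n2 d2 hd2 s2
  rw [he1, he2]
  refine pvRndivNE_mono N1 D1 N2 D2 hN1 hD1 hN2 hD2 ?_
  have hq : (N1 : ℚ) / (D1 : ℚ) ≤ (N2 : ℚ) / (D2 : ℚ) := by rw [hr1, hr2]; exact h
  have hD10 : (0 : ℚ) < (D1 : ℚ) := by exact_mod_cast hD1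
  have hD20 : (0 : ℚ) < (D2 : ℚ) := by exact_mod_cast hD2
  rw [div_le_div_iff₀ hD10 hD20] at hq
  exact_mod_cast hq

-- ---- pvRound: representation, positivity, monotonicity ----

lemma pvRat_repr (q : ℚ) (hq : 0 < q) :
    ((q.num.toNat : Nat) : ℚ) / ((q.den : Nat) : ℚ) = q ∧ 1 ≤ q.num.toNat ∧ 1 ≤ q.den := by
  have hnum : 0 < q.num := Rat.num_pos.mpr hq
  refine ⟨?_, by omega, q.pos⟩
  have h1 : ((q.num.toNat : Int) : ℚ) = (q.num : ℚ) := by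
    rw [Int.toNat_of_nonneg hnum.le]
  push_cast at h1 ⊢
  rw [h1]
  exact Rat.num_div_den q

lemma pvRound_pos_eq (q : ℚ) (hq : 0 < q) :
    pvRound q = (pvMant q.num.toNat q.den (pvExp q.num.toNat q.den - 52) : ℚ) *
      (2 : ℚ) ^ (pvExp q.num.toNat q.den - 52) := by
  rw [pvRound, if_neg (not_le.mpr hq)]
  split_ifs with hs
  · congr 1
    conv_rhs => rw [← Int.toNat_of_nonneg hs]
    rw [zpow_natCast]
  · rw [div_eq_mul_inv]
    congr 1
    conv_rhs => rw [show pvExp q.num.toNat q.den - 52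
      = -((((-(pvExp q.num.toNat q.den - 52)).toNat : Nat) : Int)) by omega]
    rw [zpow_neg, zpow_natCast]

lemma pvRound_nonneg (q : ℚ) : 0 ≤ pvRound q := by
  by_cases hq : q ≤ 0
  · rw [pvRound, if_pos hq]
  · have hq' : 0 < q := not_le.1 hq
    rw [pvRound_pos_eq q hq']
    obtain ⟨_, _, hd⟩ := pvRat_repr q hq'
    have hm := pvMant_nonneg q.num.toNat q.den hd (pvExp q.num.toNat q.den - 52)
    have hm' : (0 : ℚ) ≤ (pvMant q.num.toNat q.den (pvExp q.num.toNat q.den - 52) : ℚ) := by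
      exact_mod_cast hm
    positivity

lemma pvRound_pos (q : ℚ) (hq : 0 < q) : 0 < pvRound q := by
  rw [pvRound_pos_eq q hq]
  obtain ⟨hrepr, hn, hd⟩ := pvRat_repr q hq
  obtain ⟨hlo, hhi⟩ := pvExp_bracket q.num.toNat q.den hn hd
  rw [hrepr] at hlo hhi
  obtain ⟨hmlo, hmhi⟩ := pvMant_bounds q.num.toNat q.den hd (pvExp q.num.toNat q.den - 52)
  rw [hrepr] at hmlo hmhi
  have hX : (2 : ℚ) ^ (52 : Int) ≤ q * (2 : ℚ) ^ (-(pvExp q.num.toNat q.den - 52)) := by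
    calc (2 : ℚ) ^ (52 : Int)
        = (2 : ℚ) ^ (pvExp q.num.toNat q.den) * (2 : ℚ) ^ (-(pvExp q.num.toNat q.den - 52)) := by
          rw [← zpow_add₀ (by norm_num : (2:ℚ) ≠ 0)]; congr 1; omega
      _ ≤ q * (2 : ℚ) ^ (-(pvExp q.num.toNat q.den - 52)) :=
          mul_le_mul_of_nonneg_right hlo (by positivity)
  have hm : (0 : ℚ) < (pvMant q.num.toNat q.den (pvExp q.num.toNat q.den - 52) : ℚ) := by
    have h52 : (0 : ℚ) < (2 : ℚ) ^ (52 : Int) := by positivity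
    nlinarith
  positivity

lemma pvRound_mono (q1 q2 : ℚ) (h : q1 ≤ q2) : pvRound q1 ≤ pvRound q2 := by
  by_cases h1 : q1 ≤ 0
  · rw [pvRound, if_pos h1]
    exact pvRound_nonneg q2
  · have hq1 : 0 < q1 := not_le.1 h1
    have hq2 : 0 < q2 := lt_of_lt_of_le hq1 h
    obtain ⟨hr1, hn1, hd1⟩ := pvRat_repr q1 hq1
    obtain ⟨hr2, hn2, hd2⟩ := pvRat_repr q2 hq2
    rw [pvRound_pos_eq q1 hq1, pvRound_pos_eq q2 hq2]
    set e1 := pvExp q1.num.toNat q1.den with he1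
    set e2 := pvExp q2.num.toNat q2.den with he2
    obtain ⟨hlo1, hhi1⟩ := pvExp_bracket q1.num.toNat q1.den hn1 hd1
    obtain ⟨hlo2, hhi2⟩ := pvExp_bracket q2.num.toNat q2.den hn2 hd2
    rw [hr1] at hlo1 hhi1
    rw [hr2] at hlo2 hhi2
    set m1 := pvMant q1.num.toNat q1.den (e1 - 52) with hm1
    set m2 := pvMant q2.num.toNat q2.den (e2 - 52) with hm2
    obtain ⟨hmlo1, hmhi1⟩ := pvMant_bounds q1.num.toNat q1.den hd1 (e1 - 52)
    obtain ⟨hmlo2, hmhi2⟩ := pvMant_bounds q2.num.toNat q2.den hd2 (e2 - 52)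
    rw [hr1] at hmlo1 hmhi1
    rw [hr2] at hmlo2 hmhi2
    have hee : e1 ≤ e2 := by
      by_contra hc
      push_neg at hc
      have h21 : (2 : ℚ) ^ (e2 + 1) ≤ (2 : ℚ) ^ e1 := zpow_le_zpow_right₀ one_le_two (by omega)
      linarith
    by_cases heq : e1 = e2
    · -- same binade: the mantissas compare directly
      have hmm : m1 ≤ m2 := by
        rw [hm1, hm2]
        apply pvMant_mono _ _ hd1 _ _ _ hd2
        rw [hr1, hr2, heq]
        exact mul_le_mul_of_nonneg_right h (by positivity)
      rw [heq]
      have hq : (m1 : ℚ) ≤ (m2 : ℚ) := by exact_mod_cast hmm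
      exact mul_le_mul_of_nonneg_right hq (by positivity)
    · -- different binades: value1 ≤ 2^(e1+1) ≤ 2^e2 ≤ value2
      have hX1 : q1 * (2 : ℚ) ^ (-(e1 - 52)) < (2 : ℚ) ^ (53 : Int) := by
        calc q1 * (2 : ℚ) ^ (-(e1 - 52)) < (2 : ℚ) ^ (e1 + 1) * (2 : ℚ) ^ (-(e1 - 52)) :=
              mul_lt_mul_of_pos_right hhi1 (by positivity)
          _ = (2 : ℚ) ^ (53 : Int) := by
              rw [← zpow_add₀ (by norm_num : (2:ℚ) ≠ 0)]; congr 1; omega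
      have hX2 : (2 : ℚ) ^ (52 : Int) ≤ q2 * (2 : ℚ) ^ (-(e2 - 52)) := by
        calc (2 : ℚ) ^ (52 : Int) = (2 : ℚ) ^ e2 * (2 : ℚ) ^ (-(e2 - 52)) := by
              rw [← zpow_add₀ (by norm_num : (2:ℚ) ≠ 0)]; congr 1; omega
          _ ≤ q2 * (2 : ℚ) ^ (-(e2 - 52)) :=
              mul_le_mul_of_nonneg_right hlo2 (by positivity)
      have h53 : ((9007199254740992 : Int) : ℚ) = (2 : ℚ) ^ (53 : Int) := by norm_num
      have h52 : ((4503599627370496 : Int) : ℚ) = (2 : ℚ) ^ (52 : Int) := by norm_num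
      have hm1hi : (m1 : ℚ) ≤ (2 : ℚ) ^ (53 : Int) := by
        have hlt : (m1 : ℚ) < ((9007199254740992 + 1 : Int) : ℚ) := by
          push_cast
          push_cast at h53
          linarith
        have hint : m1 ≤ 9007199254740992 := by
          have h' : m1 < 9007199254740992 + 1 := by exact_mod_cast hlt
          omega
        rw [← h53]
        exact_mod_cast hint
      have hm2lo : (2 : ℚ) ^ (52 : Int) ≤ (m2 : ℚ) := by
        have hlt : ((4503599627370496 - 1 : Int) : ℚ) < (m2 : ℚ) := by
          push_cast
          push_cast at h52
          linarith
        have hint : 4503599627370496 ≤ m2 := by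
          have h' : 4503599627370496 - 1 < m2 := by exact_mod_cast hlt
          omega
        rw [← h52]
        exact_mod_cast hint
      calc (m1 : ℚ) * (2 : ℚ) ^ (e1 - 52)
          ≤ (2 : ℚ) ^ (53 : Int) * (2 : ℚ) ^ (e1 - 52) :=
            mul_le_mul_of_nonneg_right hm1hi (by positivity)
        _ = (2 : ℚ) ^ (e1 + 1) := by
            rw [← zpow_add₀ (by norm_num : (2:ℚ) ≠ 0)]; congr 1; omega
        _ ≤ (2 : ℚ) ^ (52 : Int) * (2 : ℚ) ^ (e2 - 52) := by
            rw [← zpow_add₀ (by norm_num : (2:ℚ) ≠ 0)]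
            exact zpow_le_zpow_right₀ one_le_two (by omega)
        _ ≤ (m2 : ℚ) * (2 : ℚ) ^ (e2 - 52) :=
            mul_le_mul_of_nonneg_right hm2lo (by positivity)

-- ---- consequences for the boundary test ----

-- the float test is monotone in dx² (rounding, division by a positive double and
-- adding a constant are all monotone), so each row is a contiguous interval
lemma pvTest_antitone (aa t : ℚ) (haa : 0 < aa) (x y : Int) (hx : 0 ≤ x) (hxy : x ≤ y)
    (hy : pvTest aa t y = true) : pvTest aa t x = true := by
  simp only [pvTest, decide_eq_true_eq] at hy ⊢
  have hsq : (x * x : Int) ≤ (y * y : Int) := by nlinarith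
  have h1 : ((x * x : Int) : ℚ) ≤ ((y * y : Int) : ℚ) := by exact_mod_cast hsq
  have h2 := pvRound_mono _ _ h1
  have h3 := div_le_div_of_nonneg_right h2 haa.le
  have h4 := pvRound_mono _ _ h3
  have h5 := pvRound_mono (pvRound (pvRound ((x * x : Int) : ℚ) / aa) + t)
    (pvRound (pvRound ((y * y : Int) : ℚ) / aa) + t) (by linarith)
  exact le_trans h5 hy

lemma pvTest_neg (aa t : ℚ) (x : Int) : pvTest aa t (-x) = pvTest aa t x := by
  simp [pvTest]

-- ---- characterisation of the while loop ----

lemma pvWhile_spec (aa t : ℚ) (a : Int) : ∀ (n : Nat) (m0 : Int), (a - m0).toNat = n →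
    m0 ≤ pvWhile aa t a m0 ∧ pvWhile aa t a m0 ≤ max m0 a ∧
    (∀ x, m0 < x → x ≤ pvWhile aa t a m0 → pvTest aa t x = true) ∧
    (pvWhile aa t a m0 < a → pvTest aa t (pvWhile aa t a m0 + 1) = false) := by
  intro n
  induction n using Nat.strong_induction_on with
  | _ n ih =>
    intro m0 hn
    by_cases hc : m0 < a ∧ pvTest aa t (m0 + 1) = true
    · rw [pvWhile, dif_pos hc]
      obtain ⟨ih1, ih2, ih3, ih4⟩ := ih (a - (m0 + 1)).toNat (by omega) (m0 + 1) rfl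
      have hmx : max (m0 + 1) a = a := max_eq_right (by omega)
      have hmx' : max m0 a = a := max_eq_right (by omega)
      refine ⟨by omega, by omega, ?_, ih4⟩
      intro x hx1 hx2
      by_cases hx : x = m0 + 1
      · rw [hx]; exact hc.2
      · exact ih3 x (by omega) hx2
    · rw [pvWhile, dif_neg hc]
      refine ⟨le_refl m0, le_max_left m0 a, fun x h1 h2 => absurd h2 (by omega), fun hlt => ?_⟩
      cases hb : pvTest aa t (m0 + 1)
      · rfl
      · exact absurd (And.intro hlt hb) hc

-- ---- range plumbing ----

-- range(-a, 0) is the mirror image of range(1, a+1)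
lemma pvRange_mirror (a : Int) :
    PySem.List.pyRange (-a) 0 1
      = ((PySem.List.pyRange 1 (a + 1) 1).map (fun x => -x)).reverse := by
  apply List.ext_getElem
  · simp [PySem.List.length_pyRange_one]
  · intro k h1 h2
    simp only [PySem.List.length_pyRange_one] at h1
    simp only [List.length_reverse, List.length_map, PySem.List.length_pyRange_one] at h2
    rw [List.getElem_reverse, List.getElem_map, PySem.List.getElem_pyRange_one,
        PySem.List.getElem_pyRange_one]
    · simp only [List.length_map, PySem.List.length_pyRange_one]
      omega

-- for an even predicate, filtering the full range equals the mirrored filtered half-range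
lemma pvRow (q : Int → Bool) (hev : ∀ x, q (-x) = q x) (a : Int) :
    (PySem.List.pyRange (-a) (a + 1) 1).filter q
      = ((((PySem.List.pyRange 0 (a + 1) 1).filter q).reverse.filter
            (fun dx => dx > 0)).map (fun dx => -dx))
        ++ (PySem.List.pyRange 0 (a + 1) 1).filter q := by
  by_cases ha : a < 0
  · rw [PySem.List.pyRange_one_eq_nil (by omega), PySem.List.pyRange_one_eq_nil (by omega)]
    simp
  · rw [PySem.List.pyRange_one_append (-a) 0 (a + 1) (by omega) (by omega), List.filter_append]
    congr 1
    have h1 : (PySem.List.pyRange 1 (a + 1) 1).filter (q ∘ fun x => -x)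
        = (PySem.List.pyRange 1 (a + 1) 1).filter q := by
      apply List.filter_congr
      intro x _
      simpa using hev x
    have hsplit : PySem.List.pyRange 0 (a + 1) 1 = 0 :: PySem.List.pyRange 1 (a + 1) 1 :=
      PySem.List.pyRange_one_cons (by omega)
    have h2 : ((List.filter q (0 :: PySem.List.pyRange 1 (a + 1) 1)).reverse.filter
          (fun dx => dx > 0))
        = (List.filter q (PySem.List.pyRange 1 (a + 1) 1)).reverse := by
      have hall : ∀ x ∈ (List.filter q (PySem.List.pyRange 1 (a + 1) 1)).reverse,
          (fun (dx : Int) => decide (dx > 0)) x = true := by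
        intro x hx
        have hm := List.mem_filter.1 (List.mem_reverse.1 hx)
        have hr := PySem.List.mem_pyRange_one.1 hm.1
        simp only [decide_eq_true_eq]
        omega
      rw [List.filter_cons]
      by_cases h0 : q 0
      · rw [if_pos h0, List.reverse_cons, List.filter_append]
        have hz : List.filter (fun dx => dx > 0) [(0 : Int)] = [] := by simp
        rw [hz, List.append_nil]
        exact List.filter_eq_self.2 hall
      · rw [if_neg (by simpa using h0)]
        exact List.filter_eq_self.2 hall
    calc (PySem.List.pyRange (-a) 0 1).filter q
        = (((PySem.List.pyRange 1 (a + 1) 1).map (fun x => -x)).reverse).filter q := by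
          rw [pvRange_mirror]
      _ = (((PySem.List.pyRange 1 (a + 1) 1).map (fun x => -x)).filter q).reverse := by
          rw [List.filter_reverse]
      _ = (((PySem.List.pyRange 1 (a + 1) 1).filter (q ∘ fun x => -x)).map (fun x => -x)).reverse := by
          rw [List.filter_map]
      _ = (((PySem.List.pyRange 1 (a + 1) 1).filter q).map (fun x => -x)).reverse := by rw [h1]
      _ = (((PySem.List.pyRange 1 (a + 1) 1).filter q).reverse).map (fun x => -x) := by
          rw [List.map_reverse]
      _ = (((PySem.List.pyRange 0 (a + 1) 1).filter q).reverse.filter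
            (fun dx => dx > 0)).map (fun dx => -dx) := by
          rw [hsplit, h2]

lemma filter_pyRange_le (a m : Int) (hm0 : -1 ≤ m) (hma : m ≤ a) :
    (PySem.List.pyRange 0 (a + 1) 1).filter (fun x => decide (x ≤ m))
      = PySem.List.pyRange 0 (m + 1) 1 := by
  rw [PySem.List.pyRange_one_append 0 (m + 1) (a + 1) (by omega) (by omega), List.filter_append]
  have h1 : (PySem.List.pyRange 0 (m + 1) 1).filter (fun x => decide (x ≤ m))
      = PySem.List.pyRange 0 (m + 1) 1 := by
    apply List.filter_eq_self.2
    intro x hx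
    have := PySem.List.mem_pyRange_one.1 hx
    simp only [decide_eq_true_eq]
    omega
  have h2 : (PySem.List.pyRange (m + 1) (a + 1) 1).filter (fun x => decide (x ≤ m)) = [] := by
    apply List.filter_eq_nil_iff.2
    intro x hx
    have := PySem.List.mem_pyRange_one.1 hx
    simp only [decide_eq_true_eq]
    omega
  rw [h1, h2, List.append_nil]

-- ---- the central row lemma: A's filtered row is exactly B's interval ----

lemma pvRowInterval (aa t : ℚ) (haa : 0 < aa) (a : Int) :
    (PySem.List.pyRange (-a) (a + 1) 1).filter (fun dx => pvTest aa t dx)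
      = PySem.List.pyRange (-(pvWhile aa t a (-1))) (pvWhile aa t a (-1) + 1) 1 := by
  by_cases ha : a < 0
  · have hw : pvWhile aa t a (-1) = -1 := by
      rw [pvWhile, dif_neg (fun hc => absurd hc.1 (by omega))]
    rw [hw, PySem.List.pyRange_one_eq_nil (by omega), PySem.List.pyRange_one_eq_nil (by omega)]
    simp
  · push_neg at ha
    obtain ⟨h1, h2, h3, h4⟩ := pvWhile_spec aa t a (a - (-1)).toNat (-1) rfl
    set m := pvWhile aa t a (-1) with hmdef
    have hmax : max (-1) a = a := max_eq_right (by omega)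
    have hma : m ≤ a := by omega
    have hkey : ∀ x, 0 ≤ x → x ≤ a → pvTest aa t x = decide (x ≤ m) := by
      intro x hx0 hxa
      by_cases hxm : x ≤ m
      · rw [h3 x (by omega) hxm]
        simp [hxm]
      · push_neg at hxm
        have hf := h4 (by omega)
        have hx : pvTest aa t x = false := by
          cases hb : pvTest aa t x
          · rfl
          · exact absurd (pvTest_antitone aa t haa (m + 1) x (by omega) (by omega) hb)
              (by rw [hf]; simp)
        rw [hx]
        symm
        simp only [decide_eq_false_iff_not]
        omega
    rw [pvRow (fun dx => pvTest aa t dx) (pvTest_neg aa t) a]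
    have hhalf : (PySem.List.pyRange 0 (a + 1) 1).filter (fun dx => pvTest aa t dx)
        = PySem.List.pyRange 0 (m + 1) 1 := by
      rw [List.filter_congr (fun x hx => by
        have hb := PySem.List.mem_pyRange_one.1 hx
        exact hkey x (by omega) (by omega))]
      exact filter_pyRange_le a m (by omega) hma
    rw [hhalf]
    by_cases hm0 : m = -1
    · rw [hm0]
      have e1 : PySem.List.pyRange 0 (-1 + 1) 1 = [] := PySem.List.pyRange_one_eq_nil (by norm_num)
      have e2 : PySem.List.pyRange (-(-1)) (-1 + 1) 1 = [] :=
        PySem.List.pyRange_one_eq_nil (by norm_num)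
      rw [e1, e2]
      simp
    · have hm0' : 0 ≤ m := by omega
      have hcons : PySem.List.pyRange 0 (m + 1) 1 = 0 :: PySem.List.pyRange 1 (m + 1) 1 :=
        PySem.List.pyRange_one_cons (by omega)
      rw [hcons]
      have hall : ∀ x ∈ (PySem.List.pyRange 1 (m + 1) 1).reverse,
          (fun (dx : Int) => decide (dx > 0)) x = true := by
        intro x hx
        have := PySem.List.mem_pyRange_one.1 (List.mem_reverse.1 hx)
        simp only [decide_eq_true_eq]
        omega
      have hfil : ((0 :: PySem.List.pyRange 1 (m + 1) 1).reverse.filter (fun dx => dx > 0))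
          = (PySem.List.pyRange 1 (m + 1) 1).reverse := by
        rw [List.reverse_cons, List.filter_append, List.filter_eq_self.2 hall]
        simp
      rw [hfil]
      have hmap : ((PySem.List.pyRange 1 (m + 1) 1).reverse).map (fun dx => -dx)
          = PySem.List.pyRange (-m) 0 1 := by
        rw [List.map_reverse, ← pvRange_mirror m]
      rw [hmap, ← hcons]
      exact (PySem.List.pyRange_one_append (-m) 0 (m + 1) (by omega) (by omega)).symm

-- ---- assembling the two programs ----

lemma pvEmit_eq_map (dy : Int) (l : List Int) : pvEmit dy l = l.map (fun dx => (dy, dx)) := by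
  induction l with
  | nil => rfl
  | cons x xs ih => simp [pvEmit, ih]

lemma pvRows_eq_flatMap (aa bb : ℚ) (a : Int) (l : List Int) :
    pvRows aa bb a l = l.flatMap (fun dy => pvEmit dy (PySem.List.pyRange
      (-(pvWhile aa (pvRound (pvRound ((dy * dy : Int) : ℚ) / bb)) a (-1)))
      ((pvWhile aa (pvRound (pvRound ((dy * dy : Int) : ℚ) / bb)) a (-1)) + 1) 1)) := by
  induction l with
  | nil => rfl
  | cons x xs ih => simp only [pvRows, ih, List.flatMap_cons]

lemma pvEq (a b : Int) : make_ellipse_offsets a b = make_ellipse_offsets_alt a b := by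
  simp only [make_ellipse_offsets, make_ellipse_offsets_alt]
  set aa := pvRound ((max 1 (a * a) : Int) : ℚ) with haa
  set bb := pvRound ((max 1 (b * b) : Int) : ℚ) with hbb
  have haa0 : 0 < aa := by
    rw [haa]
    apply pvRound_pos
    have hmx : (1 : ℚ) ≤ ((max 1 (a * a) : Int) : ℚ) := by exact_mod_cast le_max_left 1 (a * a)
    linarith
  have hrow : ∀ dy : Int,
      ((PySem.List.pyRange (-a) (a + 1) 1).filter (fun dx => pvLe1 aa bb dy dx)).map
          (fun dx => ((dy, dx) : Int × Int))
      = pvEmit dy (PySem.List.pyRange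
          (-(pvWhile aa (pvRound (pvRound ((dy * dy : Int) : ℚ) / bb)) a (-1)))
          ((pvWhile aa (pvRound (pvRound ((dy * dy : Int) : ℚ) / bb)) a (-1)) + 1) 1) := by
    intro dy
    have hEq : (fun dx => pvLe1 aa bb dy dx)
        = (fun dx => pvTest aa (pvRound (pvRound ((dy * dy : Int) : ℚ) / bb)) dx) := rfl
    rw [hEq, pvRowInterval aa _ haa0 a, pvEmit_eq_map]
  calc (PySem.List.pyRange (-b) (b + 1) 1).foldl (fun offsets dy =>
        (PySem.List.pyRange (-a) (a + 1) 1).foldl (fun offsets dx =>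
          if pvLe1 aa bb dy dx then offsets ++ [(dy, dx)] else offsets) offsets) []
      = (PySem.List.pyRange (-b) (b + 1) 1).foldl (fun offsets dy =>
          offsets ++ ((PySem.List.pyRange (-a) (a + 1) 1).filter
            (fun dx => pvLe1 aa bb dy dx)).map (fun dx => ((dy, dx) : Int × Int))) [] := by
        apply PySem.List.foldl_congr_mem
        intro acc dy _
        exact PySem.List.foldl_append_if _ _ _ _
    _ = [] ++ (PySem.List.pyRange (-b) (b + 1) 1).flatMap (fun dy =>
          ((PySem.List.pyRange (-a) (a + 1) 1).filter
            (fun dx => pvLe1 aa bb dy dx)).map (fun dx => ((dy, dx) : Int × Int))) :=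
        PySem.List.foldl_append_eq_flatMap _ _ _
    _ = pvRows aa bb a (PySem.List.pyRange (-b) (b + 1) 1) := by
        rw [List.nil_append, pvRows_eq_flatMap]
        exact congrArg (fun g => List.flatMap g (PySem.List.pyRange (-b) (b + 1) 1))
          (funext hrow)

-- ===== VERDICT (by name: the statement is the Claim_ definition above) =====
theorem make_ellipse_offsets_spec : Claim_equal_make_ellipse_offsets := by
  intro a b _
  unfold Spec_make_ellipse_offsets
  exact pvEq a b
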